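-- pv_equiv track=rewrite | github.com/JeiKeiLim/TIL | coding_test/leetcode/1695_Maximum_Erasure_Value.py | maximumUniqueSubarray2
-- ===== SOURCE A (Python) =====
-- from typing import List
-- from collections import deque
--
-- def maximumUniqueSubarray2(nums: List[int]) -> int:
--     queue = deque()
--     seen = set()
--     max_sum = 0
--     for n in nums:
--         while queue and n in seen:
--             seen.remove(queue.popleft())
--
--         queue.append(n)
--         seen.add(n)
--         max_sum = max(max_sum, sum(queue))
--
--     return max_sum
-- ===== SOURCE B (Python) =====
-- from typing import List
--
-- def maximumUniqueSubarray2(nums: List[int]) -> int: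
--     seen = set()
--     left = 0
--     window_sum = 0
--     best = 0
--     for n in nums:
--         while n in seen:
--             seen.discard(nums[left])
--             window_sum -= nums[left]
--             left += 1
--         seen.add(n)
--         window_sum += n
--         if window_sum > best:
--             best = window_sum
--     return best
-- ===== Notes on version B (the rewrite author's own statement) =====
-- stated objective: faster
-- what changed: Replaces A's deque window that re-sums the whole window with sum(queue) at every step by a two-pointer sliding window whose sum is maintained incrementally (subtract on evict, add on insert), removing the inner O(n) summation pass.
import Mathlib
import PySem

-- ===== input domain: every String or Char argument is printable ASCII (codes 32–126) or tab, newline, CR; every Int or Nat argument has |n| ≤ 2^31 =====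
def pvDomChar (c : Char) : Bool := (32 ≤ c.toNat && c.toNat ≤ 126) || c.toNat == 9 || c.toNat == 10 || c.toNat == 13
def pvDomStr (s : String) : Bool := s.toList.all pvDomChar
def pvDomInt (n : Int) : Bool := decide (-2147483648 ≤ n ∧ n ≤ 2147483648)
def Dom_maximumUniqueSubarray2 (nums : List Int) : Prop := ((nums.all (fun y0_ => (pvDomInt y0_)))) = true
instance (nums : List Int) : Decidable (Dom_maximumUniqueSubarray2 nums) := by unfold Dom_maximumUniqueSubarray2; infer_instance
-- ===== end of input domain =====

-- B replaces A's per-step re-summation of the window (sum(queue), O(n^2) total) by a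
-- two-pointer window with an incrementally maintained running sum (O(n) amortized).

-- ===== PORT A =====
-- inner 'while queue and n in seen': pop from the left, remove from seen.
-- A's set.remove is ported as Set.discard: on every execution of A the popped element
-- is a member of seen (seen holds exactly the queue's elements), where discard is exact.
def pvWhileA (queue : List Int) (seen : PySem.Set Int) (n : Int) : List Int × PySem.Set Int :=
  match queue with
  | [] => ([], seen)
  | q :: qs =>
    if PySem.Set.contains seen n then pvWhileA qs (PySem.Set.discard seen q) n
    else (q :: qs, seen)

def pvStepA (st : List Int × PySem.Set Int × Int) (n : Int) : List Int × PySem.Set Int × Int :=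
  let (queue, seen, maxSum) := st
  let (queue', seen') := pvWhileA queue seen n
  let queue'' := queue' ++ [n]
  let seen'' := PySem.Set.add seen' n
  (queue'', seen'', max maxSum queue''.sum)

def maximumUniqueSubarray2 (nums : List Int) : Int :=
  (nums.foldl pvStepA ([], PySem.Set.empty, 0)).2.2

-- ===== PORT B =====
-- inner 'while n in seen' of Source B; fuel = current size of seen bounds the number of
-- iterations (each iteration removes a member of seen), making the recursion structural.
def pvWhileB (nums : List Int) (fuel : Nat) (seen : PySem.Set Int) (wsum left n : Int) :
    PySem.Set Int × Int × Int :=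
  match fuel with
  | 0 => (seen, wsum, left)
  | fuel + 1 =>
    if PySem.Set.contains seen n then
      let x := PySem.List.pyGetD nums left 0
      pvWhileB nums fuel (PySem.Set.discard seen x) (wsum - x) (left + 1) n
    else (seen, wsum, left)

def pvStepB (nums : List Int) (st : PySem.Set Int × Int × Int × Int) (n : Int) :
    PySem.Set Int × Int × Int × Int :=
  let (seen, wsum, left, best) := st
  let (seen', wsum', left') := pvWhileB nums seen.length seen wsum left n
  let seen'' := PySem.Set.add seen' n
  let wsum'' := wsum' + n
  (seen'', wsum'', left', if wsum'' > best then wsum'' else best)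

def maximumUniqueSubarray2_alt (nums : List Int) : Int :=
  (nums.foldl (pvStepB nums) (PySem.Set.empty, 0, 0, 0)).2.2.2

-- ===== PRECONDITION & SPEC =====
def Spec_maximumUniqueSubarray2 (nums : List Int) (out : Int) : Prop := out = maximumUniqueSubarray2_alt nums
instance (nums : List Int) (out : Int) : Decidable (Spec_maximumUniqueSubarray2 nums out) := by unfold Spec_maximumUniqueSubarray2; infer_instance

-- ===== CLAIM (what is proved, stated in full; the proofs are below) =====
def Claim_equal_maximumUniqueSubarray2 : Prop := ∀ (nums : List Int), Dom_maximumUniqueSubarray2 nums → Spec_maximumUniqueSubarray2 nums (maximumUniqueSubarray2 nums)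

-- ===== LEMMAS AND PROOFS =====

-- The two inner while loops walk the same window in lockstep.
theorem pv_while_eq (pre rest : List Int) (n : Int) :
    ∀ (queue : List Int) (left : Int), 0 ≤ left → left.toNat ≤ pre.length →
    queue = pre.drop left.toNat →
    queue.Nodup →
    ∃ left' : Int, 0 ≤ left' ∧ left ≤ left' ∧ left'.toNat ≤ pre.length ∧
      (pre.drop left'.toNat).Nodup ∧ n ∉ pre.drop left'.toNat ∧
      pvWhileA queue queue n = (pre.drop left'.toNat, pre.drop left'.toNat) ∧
      pvWhileB (pre ++ rest) queue.length queue queue.sum left n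
        = (pre.drop left'.toNat, (pre.drop left'.toNat).sum, left') := by
  intro queue
  induction queue with
  | nil =>
    intro left hl hlen hq hnd
    refine ⟨left, hl, le_rfl, hlen, ?_, ?_, ?_, ?_⟩
    · rw [← hq]; exact List.nodup_nil
    · rw [← hq]; simp
    · rw [← hq]; rfl
    · rw [← hq]; rfl
  | cons q qs ih =>
    intro left hl hlen hq hnd
    have hlt : left.toNat < pre.length := by
      by_contra h
      have : pre.drop left.toNat = [] := List.drop_eq_nil_of_le (by omega)
      rw [this] at hq; exact List.cons_ne_nil q qs hq
    have hqnot : q ∉ qs := (List.nodup_cons.mp hnd).1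
    by_cases hn : n ∈ q :: qs
    · -- loop body runs once, then induction on the tail
      have hcon : PySem.Set.contains (q :: qs) n = true := by
        simp [PySem.Set.contains, hn]
      have hx : PySem.List.pyGetD (pre ++ rest) left 0 = q := by
        have h0' : (List.drop left.toNat pre)[0]? = pre[left.toNat + 0]? :=
          List.getElem?_drop
        have h0 : (pre ++ rest)[left.toNat]? = some q := by
          rw [List.getElem?_append_left (by omega)]
          rw [← hq] at h0'; simpa using h0'.symm
        have hleft : ((left.toNat : Nat) : Int) = left := Int.toNat_of_nonneg hl
        have hget : PySem.List.pyGet? (pre ++ rest) left = some q := by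
          rw [← hleft, PySem.List.pyGet?_natCast, h0]
        simp [PySem.List.pyGetD, hget]
      have hdis : PySem.Set.discard (q :: qs) q = qs := by
        simp only [PySem.Set.discard, List.filter_cons, beq_self_eq_true,
          Bool.not_true, Bool.false_eq_true, if_false]
        refine List.filter_eq_self.mpr ?_
        intro a ha
        have hne : a ≠ q := fun h => hqnot (h ▸ ha)
        simp [hne]
      have hqs : qs = pre.drop (left + 1).toNat := by
        have h' : (left + 1).toNat = left.toNat + 1 := by omega
        rw [h']
        have htl := congrArg List.tail hq
        simpa [List.tail_drop] using htl
      obtain ⟨left', h0, h1, h2, h3, h4, h5, h6⟩ :=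
        ih (left + 1) (by omega) (by omega) hqs (List.nodup_cons.mp hnd).2
      refine ⟨left', h0, by omega, h2, h3, h4, ?_, ?_⟩
      · show pvWhileA (q :: qs) (q :: qs) n = _
        rw [pvWhileA, if_pos hcon, hdis]
        exact h5
      · show pvWhileB (pre ++ rest) (qs.length + 1) (q :: qs) ((q :: qs).sum) left n = _
        rw [pvWhileB]
        simp only [hcon, if_pos, hx, hdis]
        have hsum : (q :: qs).sum - q = qs.sum := by simp [List.sum_cons]
        rw [hsum]
        exact h6
    · -- n not in window: both loops stop immediately
      have hcon : PySem.Set.contains (q :: qs) n = false := by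
        simpa [PySem.Set.contains] using hn
      refine ⟨left, hl, le_rfl, by omega, by rw [← hq]; exact hnd,
        by rw [← hq]; exact hn, ?_, ?_⟩
      · show pvWhileA (q :: qs) (q :: qs) n = _
        rw [pvWhileA, if_neg (by simpa using hn), hq]
      · show pvWhileB (pre ++ rest) (qs.length + 1) (q :: qs) ((q :: qs).sum) left n = _
        rw [pvWhileB, if_neg (by simpa using hn), hq]

-- Main induction: the folds preserve the relation between A's and B's states.
theorem pv_fold_eq (nums : List Int) :
    ∀ (rest pre : List Int) (left best : Int),
    nums = pre ++ rest → 0 ≤ left → left.toNat ≤ pre.length →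
    (pre.drop left.toNat).Nodup →
    (rest.foldl pvStepA (pre.drop left.toNat, (pre.drop left.toNat : PySem.Set Int), best)).2.2
      = (rest.foldl (pvStepB nums)
          ((pre.drop left.toNat : PySem.Set Int), (pre.drop left.toNat).sum, left, best)).2.2.2 := by
  intro rest
  induction rest with
  | nil => intro pre left best hnums hl hlen hnd; rfl
  | cons n rest ih =>
    intro pre left best hnums hl hlen hnd
    obtain ⟨left', h0, h1, h2, h3, h4, h5, h6⟩ :=
      pv_while_eq pre (n :: rest) n (pre.drop left.toNat) left hl hlen rfl hnd
    have hdrop : (pre ++ [n]).drop left'.toNat = pre.drop left'.toNat ++ [n] :=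
      List.drop_append_of_le_length h2
    have hadd : PySem.Set.add (pre.drop left'.toNat : PySem.Set Int) n
        = pre.drop left'.toNat ++ [n] := PySem.Set.add_of_not_mem h4
    have hmax : (if (pre.drop left'.toNat).sum + n > best then (pre.drop left'.toNat).sum + n
          else best) = max best ((pre.drop left'.toNat ++ [n]).sum) := by
      simp only [List.sum_append, List.sum_cons, List.sum_nil, add_zero]
      omega
    have hA : pvStepA (pre.drop left.toNat, (pre.drop left.toNat : PySem.Set Int), best) n
        = ((pre ++ [n]).drop left'.toNat, ((pre ++ [n]).drop left'.toNat : PySem.Set Int),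
            max best (((pre ++ [n]).drop left'.toNat).sum)) := by
      simp only [pvStepA, h5, hadd, hdrop]
    have hB : pvStepB nums ((pre.drop left.toNat : PySem.Set Int),
          (pre.drop left.toNat).sum, left, best) n
        = (((pre ++ [n]).drop left'.toNat : PySem.Set Int),
            ((pre ++ [n]).drop left'.toNat).sum, left',
            max best (((pre ++ [n]).drop left'.toNat).sum)) := by
      simp only [pvStepB, hnums, h6, hadd, hdrop, hmax]
      simp [List.sum_append]
    rw [List.foldl_cons, List.foldl_cons, hA, hB]
    exact ih (pre ++ [n]) left' (max best (((pre ++ [n]).drop left'.toNat).sum))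
      (by simpa [List.append_assoc] using hnums) h0 (by simp; omega)
      (by rw [hdrop]; simp [List.nodup_append, h3]; exact fun a ha h => h4 (h ▸ ha))

-- ===== VERDICT (by name: the statement is the Claim_ definition above) =====
theorem maximumUniqueSubarray2_spec : Claim_equal_maximumUniqueSubarray2 := by
  intro nums _
  unfold Spec_maximumUniqueSubarray2 maximumUniqueSubarray2 maximumUniqueSubarray2_alt
  have h := pv_fold_eq nums nums [] 0 0 rfl le_rfl (by simp) (by simp)
  simpa using h
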